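-- pv_equiv track=rewrite | github.com/matts-og/adventofcode2019 | day04/combinations.py | next_candidate
-- ===== SOURCE A (Python) =====
-- import math
--
-- def get_digit(n, d):
--     return math.floor(n / pow(10,d)) % 10
--
-- def next_candidate(n):
--     res = 0
--     d = get_digit(n, 0)
--     if d + 1 > 9:
--         high = next_candidate(math.floor(n/10))
--         res = get_digit(high,0) + high * 10
--     else:
--         res = d + 1 + math.floor(n/10) * 10
--     return res
-- ===== SOURCE B (Python) =====
-- def next_candidate(n):
--     # Iterative: strip trailing 9-digits, increment the first non-9 digit,
--     # then re-append one duplicated low digit per stripped 9.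
--     m = n
--     k = 0
--     while m % 10 == 9:
--         m //= 10
--         k += 1
--     res = m % 10 + 1 + (m // 10) * 10
--     for _ in range(k):
--         res = res % 10 + res * 10
--     return res
-- ===== Notes on version B (the rewrite author's own statement) =====
-- stated objective: alternative
-- what changed: Replaces A's recursion (recurse on n//10 while the last digit is 9, re-appending a duplicated digit on the way back) with an explicit two-loop iteration: a while loop strips trailing 9s counting them, the found digit is incremented once, and a for loop re-appends one duplicated low digit per stripped 9.
-- outside the precondition, e.g. on next_candidate(-1): A raises RecursionError, B does not finish within the time limit
import Mathlib
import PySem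

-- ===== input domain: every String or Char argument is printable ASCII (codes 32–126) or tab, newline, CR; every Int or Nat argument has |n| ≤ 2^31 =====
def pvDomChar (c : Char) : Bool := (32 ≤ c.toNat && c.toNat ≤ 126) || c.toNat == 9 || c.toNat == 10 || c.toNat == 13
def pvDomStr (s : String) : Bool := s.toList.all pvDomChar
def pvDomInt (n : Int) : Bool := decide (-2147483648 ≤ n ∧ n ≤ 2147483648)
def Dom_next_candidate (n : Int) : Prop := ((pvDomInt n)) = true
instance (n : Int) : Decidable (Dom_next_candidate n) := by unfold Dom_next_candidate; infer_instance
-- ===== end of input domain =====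

-- B replaces A's recursion by an explicit strip-trailing-9s loop plus a rebuild loop (alternative decomposition, same cost).
-- Float arithmetic in A (math.floor(n/10), pow) is exact on the domain |n| ≤ 2^31 < 2^53, so it ports to integer floor division.

-- ===== PORT A =====
-- get_digit(n, d) = math.floor(n / pow(10,d)) % 10; exact on Dom (floats round nothing for |n| ≤ 2^31); only called with d = 0
def get_digit (n d : Int) : Int := PySem.Int.mod (PySem.Int.floordiv n (10 ^ d.toNat)) 10

-- fuel only makes the recursion total: n.natAbs strictly decreases at every recursive call (n = -1, where A's
-- recursion diverges, is excluded by Pre_), so the fuel next_candidate supplies is never exhausted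
def nextCandA : Nat → Int → Int
  | 0, _ => 0
  | fuel+1, n =>
    let d := get_digit n 0
    if d + 1 > 9 then
      let high := nextCandA fuel (PySem.Int.floordiv n 10)
      get_digit high 0 + high * 10
    else
      d + 1 + PySem.Int.floordiv n 10 * 10

def next_candidate (n : Int) : Int := nextCandA (n.natAbs + 1) n

-- ===== PORT B =====
-- the while loop of Source B, fuel-totalised the same way; returns (m after the loop, number of iterations k)
def stripNines : Nat → Int → Int × Nat
  | 0, m => (m, 0)
  | fuel+1, m =>
    if PySem.Int.mod m 10 = 9 then
      let p := stripNines fuel (PySem.Int.floordiv m 10)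
      (p.1, p.2 + 1)
    else (m, 0)

-- the 'for _ in range(k)' loop of Source B
def dupLow : Nat → Int → Int
  | 0, res => res
  | k+1, res => dupLow k (PySem.Int.mod res 10 + res * 10)

def next_candidate_alt (n : Int) : Int :=
  let p := stripNines (n.natAbs + 1) n
  dupLow p.2 (PySem.Int.mod p.1 10 + 1 + PySem.Int.floordiv p.1 10 * 10)

-- ===== PRECONDITION & SPEC =====
-- Pre_ excludes only n = -1: there A recurses on itself forever and raises RecursionError (B's while loop diverges too).
def Pre_next_candidate (n : Int) : Prop := n ≠ -1
instance (n : Int) : Decidable (Pre_next_candidate n) := by unfold Pre_next_candidate; infer_instance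
def pvWitness_next_candidate : Int := 199

def Spec_next_candidate (n : Int) (out : Int) : Prop := out = next_candidate_alt n
instance (n : Int) (out : Int) : Decidable (Spec_next_candidate n out) := by unfold Spec_next_candidate; infer_instance

-- ===== CLAIM (what is proved, stated in full; the proofs are below) =====
def Claim_equal_next_candidate : Prop := ∀ (n : Int), Dom_next_candidate n → Pre_next_candidate n → Spec_next_candidate n (next_candidate n)

-- ===== LEMMAS AND PROOFS =====

theorem get_digit_zero (n : Int) : get_digit n 0 = PySem.Int.mod n 10 := by
  simp [get_digit]

theorem mod10_bounds (n : Int) : 0 ≤ PySem.Int.mod n 10 ∧ PySem.Int.mod n 10 < 10 := by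
  rw [PySem.Int.mod_eq_emod_of_pos (by norm_num)]
  constructor
  · exact Int.emod_nonneg n (by norm_num)
  · exact Int.emod_lt_of_pos n (by norm_num)

theorem step_facts (n : Int) (h9 : PySem.Int.mod n 10 = 9) (hn : n ≠ -1) :
    (PySem.Int.floordiv n 10).natAbs < n.natAbs ∧ PySem.Int.floordiv n 10 ≠ -1 := by
  rw [PySem.Int.mod_eq_emod_of_pos (by norm_num)] at h9
  rw [PySem.Int.floordiv_eq_ediv_of_pos (show (0:Int) < 10 by norm_num)]
  omega

theorem dupLow_succ (k : Nat) (r : Int) :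
    dupLow (k+1) r = PySem.Int.mod (dupLow k r) 10 + dupLow k r * 10 := by
  induction k generalizing r with
  | zero => rfl
  | succ k ih =>
    show dupLow (k+1) (PySem.Int.mod r 10 + r * 10) = _
    rw [ih]
    rfl

theorem main_lemma (fuel : Nat) : ∀ (n : Int), n ≠ -1 → n.natAbs < fuel →
    nextCandA fuel n =
      dupLow (stripNines fuel n).2
        (PySem.Int.mod (stripNines fuel n).1 10 + 1 +
          PySem.Int.floordiv (stripNines fuel n).1 10 * 10) := by
  induction fuel with
  | zero => intro n _ h; omega
  | succ fuel ih =>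
    intro n hn hlt
    by_cases h9 : PySem.Int.mod n 10 = 9
    · obtain ⟨hdec, hne⟩ := step_facts n h9 hn
      have ih' := ih (PySem.Int.floordiv n 10) hne (by omega)
      show (if get_digit n 0 + 1 > 9 then _ else _) = _
      rw [get_digit_zero, h9]
      simp only [show (9:Int) + 1 > 9 by norm_num, if_true]
      have hs : stripNines (fuel+1) n =
          ((stripNines fuel (PySem.Int.floordiv n 10)).1,
           (stripNines fuel (PySem.Int.floordiv n 10)).2 + 1) := by
        show (if PySem.Int.mod n 10 = 9 then _ else _) = _
        rw [if_pos h9]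
      rw [hs]
      simp only []
      rw [dupLow_succ, ← ih', get_digit_zero]
    · have hd := mod10_bounds n
      show (if get_digit n 0 + 1 > 9 then _ else _) = _
      rw [get_digit_zero]
      rw [if_neg (by omega)]
      have hs : stripNines (fuel+1) n = (n, 0) := by
        show (if PySem.Int.mod n 10 = 9 then _ else _) = _
        rw [if_neg h9]
      rw [hs]
      show _ = PySem.Int.mod n 10 + 1 + PySem.Int.floordiv n 10 * 10
      ring

-- ===== VERDICT (by name: the statement is the Claim_ definition above) =====
theorem next_candidate_spec : Claim_equal_next_candidate := by
  intro n _ hpre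
  unfold Spec_next_candidate next_candidate next_candidate_alt
  exact main_lemma (n.natAbs + 1) n hpre (by omega)
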